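-- pv_equiv track=rewrite | github.com/pypi-data/pypi-mirror-356 | packages/mizue/mizue-0.7.4-py3-none-any.whl/mizue/printer/grid/grid.py | _get_multiline_cell_offset_rows
-- ===== SOURCE A (Python) =====
-- def _get_multiline_cell_offset_rows(row: list[str]) -> list[list[str]]:
--     rows: list[list[str]] = []
--     row_lines = map(lambda cell: cell.splitlines(), row)
--     max_line_count = max(map(lambda lines: len(lines), row_lines))
--     for i in range(max_line_count):
--         rows.append([])
--     for cell in row:
--         lines = cell.splitlines()
--         for i in range(max_line_count):
--             if i < len(lines):
--                 rows[i].append(lines[i])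
--             else:
--                 rows[i].append("")
--     return rows
-- ===== SOURCE B (Python) =====
-- def _get_multiline_cell_offset_rows(row: list[str]) -> list[list[str]]:
--     cols = [cell.splitlines() for cell in row]
--     height = max(len(lines) for lines in cols)
--     padded = [lines + [""] * (height - len(lines)) for lines in cols]
--     return [list(line_row) for line_row in zip(*padded)]
-- ===== Notes on version B (the rewrite author's own statement) =====
-- stated objective: idiomatic
-- what changed: Replaces pre-allocating empty rows and an index-based nested append loop with split-once, pad-to-height, then a zip(*padded) transpose.
-- outside the precondition, e.g. on _get_multiline_cell_offset_rows([]): A raises ValueError, B raises ValueError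
import Mathlib
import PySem

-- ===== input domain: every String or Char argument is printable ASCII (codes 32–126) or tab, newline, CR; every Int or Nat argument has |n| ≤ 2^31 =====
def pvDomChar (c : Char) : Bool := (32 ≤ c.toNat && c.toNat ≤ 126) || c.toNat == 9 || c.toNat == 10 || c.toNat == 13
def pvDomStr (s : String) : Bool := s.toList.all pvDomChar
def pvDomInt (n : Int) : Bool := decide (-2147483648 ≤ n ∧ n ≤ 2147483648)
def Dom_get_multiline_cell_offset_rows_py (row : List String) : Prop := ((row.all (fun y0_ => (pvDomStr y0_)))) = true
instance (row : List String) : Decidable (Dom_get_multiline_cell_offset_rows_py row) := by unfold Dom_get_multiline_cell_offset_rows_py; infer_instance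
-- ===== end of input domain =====

-- B replaces A's pre-allocated rows and index-based nested append loop by split-once,
-- pad-to-height, then a zip(*padded) transpose (objective: more idiomatic; same cost).

-- ===== PORT A =====
-- rows[i].append(x) on the mutable list of rows
def pvAppendAt (rows : List (List String)) (i : Nat) (x : String) : List (List String) :=
  rows.set i (rows.getD i [] ++ [x])

def get_multiline_cell_offset_rows_py (row : List String) : List (List String) :=
  let row_lines := row.map (fun cell => PySem.Str.splitlines cell)
  -- max(...) raises ValueError on an empty sequence: excluded by Pre_ (row ≠ [])
  let max_line_count : Nat :=
    (PySem.List.max? (row_lines.map (fun lines => lines.length)) (fun x => x)).getD 0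
  let rows0 : List (List String) :=
    (List.range max_line_count).foldl (fun rs _ => rs ++ [[]]) []
  row.foldl (fun rs cell =>
    let lines := PySem.Str.splitlines cell
    (List.range max_line_count).foldl (fun rs i =>
      if i < lines.length then pvAppendAt rs i (lines.getD i "")
      else pvAppendAt rs i "") rs) rows0

-- ===== PORT B =====
-- zip(*lists): truncate to the shortest list and take the i-th element of each
def pvZipStar (ls : List (List String)) : List (List String) :=
  match PySem.List.min? (ls.map (fun l => l.length)) (fun x => x) with
  | none => []
  | some m => (List.range m).map (fun i => ls.map (fun l => l.getD i ""))

def get_multiline_cell_offset_rows_py_alt (row : List String) : List (List String) :=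
  let cols := row.map (fun cell => PySem.Str.splitlines cell)
  -- max(...) raises ValueError on an empty sequence: excluded by Pre_ (row ≠ [])
  let height : Nat :=
    (PySem.List.max? (cols.map (fun lines => lines.length)) (fun x => x)).getD 0
  let padded := cols.map (fun lines => lines ++ List.replicate (height - lines.length) "")
  pvZipStar padded

-- ===== PRECONDITION & SPEC =====
-- On row = [] both Pythons raise ValueError (max() of an empty sequence); that input is excluded.
def Pre_get_multiline_cell_offset_rows_py (row : List String) : Prop := row ≠ []
instance (row : List String) : Decidable (Pre_get_multiline_cell_offset_rows_py row) := by
  unfold Pre_get_multiline_cell_offset_rows_py; infer_instance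

def pvWitness_get_multiline_cell_offset_rows_py : List String := ["a\nbc", "x"]

def Spec_get_multiline_cell_offset_rows_py (row : List String) (out : List (List String)) : Prop := out = get_multiline_cell_offset_rows_py_alt row
instance (row : List String) (out : List (List String)) : Decidable (Spec_get_multiline_cell_offset_rows_py row out) := by unfold Spec_get_multiline_cell_offset_rows_py; infer_instance

-- ===== CLAIM (what is proved, stated in full; the proofs are below) =====
def Claim_equal_get_multiline_cell_offset_rows_py : Prop := ∀ (row : List String), Dom_get_multiline_cell_offset_rows_py row → Pre_get_multiline_cell_offset_rows_py row → Spec_get_multiline_cell_offset_rows_py row (get_multiline_cell_offset_rows_py row)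

-- ===== LEMMAS AND PROOFS =====

lemma pv_getD_set_self (l : List (List String)) (i : Nat) (h : i < l.length) (x : List String) :
    (l.set i x).getD i [] = x := by
  simp [List.getD, h]

lemma pv_getD_set_ne (l : List (List String)) (i j : Nat) (h : i ≠ j) (x : List String) :
    (l.set i x).getD j [] = l.getD j [] := by
  simp [List.getD, h]

lemma pv_getD_appendAt_self (rs : List (List String)) (i : Nat) (h : i < rs.length)
    (x : String) : (pvAppendAt rs i x).getD i [] = rs.getD i [] ++ [x] :=
  pv_getD_set_self rs i h _

lemma pv_getD_appendAt_ne (rs : List (List String)) (i j : Nat) (h : i ≠ j) (x : String) :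
    (pvAppendAt rs i x).getD j [] = rs.getD j [] :=
  pv_getD_set_ne rs i j h _

-- rows0: the append loop builds n empty rows
lemma pv_rows0_eq (n : Nat) :
    (List.range n).foldl (fun (rs : List (List String)) _ => rs ++ [[]]) [] =
      List.replicate n [] := by
  induction n with
  | zero => simp
  | succ k ih => simp [List.range_succ, ih, List.replicate_succ']

-- pvAppendAt preserves length
lemma pv_appendAt_length (rs : List (List String)) (i : Nat) (x : String) :
    (pvAppendAt rs i x).length = rs.length := by
  simp [pvAppendAt]

-- A's inner branch collapses: out-of-range getD is the default ""
lemma pv_if_appendAt (rs : List (List String)) (lines : List String) (i : Nat) :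
    (if i < lines.length then pvAppendAt rs i (lines.getD i "")
     else pvAppendAt rs i "") = pvAppendAt rs i (lines.getD i "") := by
  split_ifs with h
  · rfl
  · rw [List.getD_eq_default _ _ (by omega)]

-- the inner index loop: length preserved
lemma pv_inner_length (f : Nat → String) (k : Nat) (rs : List (List String)) :
    ((List.range k).foldl (fun rs i => pvAppendAt rs i (f i)) rs).length = rs.length := by
  induction k generalizing rs with
  | zero => simp
  | succ m ih => simp [List.range_succ, pv_appendAt_length, ih]

-- the inner index loop: element description
lemma pv_inner_getElem (f : Nat → String) (k : Nat) (rs : List (List String))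
    (hk : k ≤ rs.length) (j : Nat) (hj : j < rs.length) :
    ((List.range k).foldl (fun rs i => pvAppendAt rs i (f i)) rs).getD j [] =
      if j < k then rs.getD j [] ++ [f j] else rs.getD j [] := by
  induction k generalizing rs with
  | zero => simp
  | succ m ih =>
    have hm : m ≤ rs.length := Nat.le_of_succ_le hk
    have hlen := pv_inner_length f m rs
    rw [List.range_succ, List.foldl_append, List.foldl_cons, List.foldl_nil]
    rcases Nat.lt_trichotomy j m with h | h | h
    · rw [pv_getD_appendAt_ne _ _ _ (by omega), ih rs hm hj]
      simp [Nat.lt_succ_of_lt h, h]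
    · subst h
      rw [pv_getD_appendAt_self _ _ (by rw [hlen]; omega), ih rs hm hj]
      simp
    · rw [pv_getD_appendAt_ne _ _ _ (by omega), ih rs hm hj]
      have h1 : ¬ j < m := by omega
      have h2 : ¬ j < m + 1 := by omega
      simp [h1, h2]

-- the outer loop over cells: length preserved
lemma pv_outer_length (n : Nat) (row : List String) (rs : List (List String)) :
    (row.foldl (fun rs cell =>
        (List.range n).foldl (fun rs i =>
          pvAppendAt rs i ((PySem.Str.splitlines cell).getD i "")) rs) rs).length
      = rs.length := by
  induction row generalizing rs with
  | nil => rfl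
  | cons c t ih => rw [List.foldl_cons, ih, pv_inner_length]

-- the outer loop over cells: element description
lemma pv_outer_getElem (n : Nat) (row : List String) (rs : List (List String))
    (hn : rs.length = n) (j : Nat) (hj : j < n) :
    (row.foldl (fun rs cell =>
        (List.range n).foldl (fun rs i =>
          pvAppendAt rs i ((PySem.Str.splitlines cell).getD i "")) rs) rs).getD j []
      = rs.getD j [] ++ row.map (fun cell => (PySem.Str.splitlines cell).getD j "") := by
  induction row generalizing rs with
  | nil => simp
  | cons c t ih =>
    rw [List.foldl_cons, List.map_cons]
    rw [ih _ (by rw [pv_inner_length]; exact hn)]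
    rw [pv_inner_getElem _ n rs (by omega) j (by omega)]
    simp [hj]

-- foldl min over a constant list
lemma pv_foldl_min_replicate (k h : Nat) :
    (List.replicate k h).foldl min h = h := by
  induction k with
  | zero => rfl
  | succ m ih => simp [List.replicate_succ, ih]

-- getD through padding with ""
lemma pv_getD_pad (l : List String) (m i : Nat) :
    (l ++ List.replicate m "").getD i "" = l.getD i "" := by
  by_cases h : i < l.length
  · rw [List.getD_append _ _ _ _ h]
  · rw [List.getD_eq_default l _ (by omega)]
    simp only [List.getD, List.getElem?_append_right (by omega : l.length ≤ i)]
    by_cases h2 : i - l.length < m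
    · simp [h2]
    · rw [List.getElem?_eq_none (by simpa using by omega)]
      rfl

-- all padded lengths are exactly the height
lemma pv_padlen (cols : List (List String)) (h : Nat) (hh : ∀ l ∈ cols, l.length ≤ h) :
    ((cols.map (fun lines => lines ++ List.replicate (h - lines.length) "")).map
        (fun l => l.length)) = List.replicate cols.length h := by
  rw [List.map_map, List.eq_replicate_iff]
  refine ⟨by simp, ?_⟩
  intro x hx
  rcases List.mem_map.mp hx with ⟨l, hl, rfl⟩
  have := hh l hl
  simp; omega

-- zip(*padded) of lists padded to a common height is the column-wise transpose
lemma pv_zipstar_padded (cols : List (List String)) (h : Nat) (hc : cols ≠ [])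
    (hh : ∀ l ∈ cols, l.length ≤ h) :
    pvZipStar (cols.map (fun lines => lines ++ List.replicate (h - lines.length) "")) =
      (List.range h).map (fun i => cols.map (fun l => l.getD i "")) := by
  simp only [pvZipStar, pv_padlen cols h hh]
  cases cols with
  | nil => exact absurd rfl hc
  | cons c t =>
    simp only [List.length_cons, List.replicate_succ, PySem.List.min?_id_cons,
      pv_foldl_min_replicate]
    apply List.map_congr_left
    intro i _
    rw [List.map_map]
    apply List.map_congr_left
    intro l _
    exact pv_getD_pad _ _ _

-- characterisation of B
lemma pv_alt_char (row : List String) (hrow : row ≠ []) :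
    get_multiline_cell_offset_rows_py_alt row =
      (List.range ((PySem.List.max?
          ((row.map (fun cell => PySem.Str.splitlines cell)).map (fun lines => lines.length))
          (fun x => x)).getD 0)).map
        (fun i => row.map (fun cell => (PySem.Str.splitlines cell).getD i "")) := by
  have hcne : row.map (fun cell => PySem.Str.splitlines cell) ≠ [] := by
    simpa using hrow
  have hmax : ∀ l ∈ row.map (fun cell => PySem.Str.splitlines cell), l.length ≤
      (PySem.List.max?
        ((row.map (fun cell => PySem.Str.splitlines cell)).map (fun lines => lines.length))
        (fun x => x)).getD 0 := by
    intro l hl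
    rcases hm : PySem.List.max?
        ((row.map (fun cell => PySem.Str.splitlines cell)).map (fun lines => lines.length))
        (fun x => x) with _ | m
    · rw [PySem.List.max?_eq_none_iff] at hm
      simp at hm
      exact absurd (by simp [hm]) hcne
    · have := PySem.List.max?_isMax hm l.length (List.mem_map_of_mem hl)
      rw [hm]
      simpa using this
  simp only [get_multiline_cell_offset_rows_py_alt]
  rw [pv_zipstar_padded _ _ hcne hmax]
  simp [List.map_map, Function.comp]

-- ===== VERDICT (by name: the statement is the Claim_ definition above) =====
theorem get_multiline_cell_offset_rows_py_spec : Claim_equal_get_multiline_cell_offset_rows_py := by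
  intro row _ hpre
  unfold Spec_get_multiline_cell_offset_rows_py
  rw [pv_alt_char row hpre]
  simp only [get_multiline_cell_offset_rows_py, pv_if_appendAt, pv_rows0_eq]
  set n := (PySem.List.max?
      ((row.map (fun cell => PySem.Str.splitlines cell)).map (fun lines => lines.length))
      (fun x => x)).getD 0 with hn
  apply List.ext_getElem
  · rw [pv_outer_length]; simp
  · intro j h1 h2
    have hj : j < n := by simpa using h2
    calc _ = (row.foldl (fun rs cell =>
          (List.range n).foldl (fun rs i =>
            pvAppendAt rs i ((PySem.Str.splitlines cell).getD i "")) rs)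
          (List.replicate n [])).getD j [] := (List.getD_eq_getElem _ _ h1).symm
      _ = _ := by
          rw [pv_outer_getElem n row _ (by simp) j hj]
          simp [hj]
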